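-- pv_equiv track=rewrite | github.com/VadimGrishin/ALGORITMS_SD | DZ4/task1.py | sbetween_maxmin_af
-- ===== SOURCE A (Python) =====
-- def sbetween_maxmin_af(arr):
--     res = []
--     mx = max(arr)
--     mn = min(arr)
--     # Расчет сумм между экстремумами разных типов
--     beg_slope_ind = -1
--     sum_between = 0
--     for i, v in enumerate(arr):
--         if v in (mx, mn):
--             if beg_slope_ind > -1:
--                 if (arr[beg_slope_ind] - arr[i]) != 0:
--                     # res=[[начало склона, конец склона, сумма по склону],...]:
--                     res.append([beg_slope_ind, i, sum_between])
--             beg_slope_ind = i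
--             sum_between = 0
--         else:
--             sum_between += arr[i]
--     return res
-- ===== SOURCE B (Python) =====
-- def sbetween_maxmin_af(arr):
--     # Table of extreme positions first, then one pairwise pass with slice sums.
--     mx = max(arr)
--     mn = min(arr)
--     idx = [i for i, v in enumerate(arr) if v == mx or v == mn]
--     return [[p, q, sum(arr[p + 1:q])]
--             for p, q in zip(idx, idx[1:])
--             if arr[p] != arr[q]]
-- ===== Notes on version B (the rewrite author's own statement) =====
-- stated objective: simpler
-- what changed: Replaces A's single stateful scan (sentinel begin-index, running between-sum, in-loop resets) with an explicit table of extreme positions followed by a pairwise pass that sums the slice between consecutive extremes of different value.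
import Mathlib
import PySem

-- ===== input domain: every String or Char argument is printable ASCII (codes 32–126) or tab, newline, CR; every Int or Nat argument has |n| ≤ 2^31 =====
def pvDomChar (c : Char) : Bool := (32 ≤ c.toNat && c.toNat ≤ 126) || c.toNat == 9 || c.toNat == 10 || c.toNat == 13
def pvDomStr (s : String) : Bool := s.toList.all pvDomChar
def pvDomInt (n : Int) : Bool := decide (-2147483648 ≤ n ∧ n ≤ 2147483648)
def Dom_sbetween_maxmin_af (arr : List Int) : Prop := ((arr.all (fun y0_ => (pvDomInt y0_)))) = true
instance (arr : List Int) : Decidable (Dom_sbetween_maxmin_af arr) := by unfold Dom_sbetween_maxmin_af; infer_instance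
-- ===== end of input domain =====

-- B replaces A's stateful scan by an extreme-position table plus a pairwise slice-sum pass (objective: simpler).

-- ===== PORT A =====
-- A: single scan carrying (res, beg_slope_ind, sum_between); arr[i] reads are pyGetD (always in range here).
def sbetween_maxmin_af (arr : List Int) : List (List Int) :=
  match PySem.List.max? arr (fun x => x), PySem.List.min? arr (fun x => x) with
  | some mx, some mn =>
      ((PySem.List.enumerate arr).foldl
        (fun (st : List (List Int) × Int × Int) (iv : Int × Int) =>
          if iv.2 == mx || iv.2 == mn then
            (if st.2.1 > -1 then
               if PySem.List.pyGetD arr st.2.1 0 - PySem.List.pyGetD arr iv.1 0 ≠ 0 then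
                 st.1 ++ [[st.2.1, iv.1, st.2.2]]
               else st.1
             else st.1, iv.1, 0)
          else (st.1, st.2.1, st.2.2 + PySem.List.pyGetD arr iv.1 0))
        ([], -1, 0)).1
  | _, _ => []   -- unreachable under Pre_ (max/min raise ValueError on [])

-- ===== PORT B =====
def sbetween_maxmin_af_alt (arr : List Int) : List (List Int) :=
  match PySem.List.max? arr (fun x => x) with
  | none => []   -- unreachable under Pre_ (max raises ValueError on [])
  | some mx =>
    match PySem.List.min? arr (fun x => x) with
    | none => []   -- unreachable under Pre_
    | some mn =>
      let idx := ((PySem.List.enumerate arr).filter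
                    (fun iv => iv.2 == mx || iv.2 == mn)).map (·.1)
      (idx.zip (PySem.List.slice idx (some 1) none)).filterMap
        (fun pq =>
          if PySem.List.pyGetD arr pq.1 0 ≠ PySem.List.pyGetD arr pq.2 0 then
            some [pq.1, pq.2, (PySem.List.slice arr (some (pq.1 + 1)) (some pq.2)).sum]
          else none)

-- ===== PRECONDITION & SPEC =====
-- Pre_ excludes only the empty list, on which Python's max/min raise ValueError in both A and B.
def Pre_sbetween_maxmin_af (arr : List Int) : Prop := arr ≠ []
instance (arr : List Int) : Decidable (Pre_sbetween_maxmin_af arr) := by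
  unfold Pre_sbetween_maxmin_af; infer_instance
def pvWitness_sbetween_maxmin_af : List Int := [1, 2, 5, 0, 3, 5, 1, 0]

def Spec_sbetween_maxmin_af (arr : List Int) (out : List (List Int)) : Prop := out = sbetween_maxmin_af_alt arr
instance (arr : List Int) (out : List (List Int)) : Decidable (Spec_sbetween_maxmin_af arr out) := by unfold Spec_sbetween_maxmin_af; infer_instance

-- ===== CLAIM (what is proved, stated in full; the proofs are below) =====
def Claim_equal_sbetween_maxmin_af : Prop := ∀ (arr : List Int), Dom_sbetween_maxmin_af arr → Pre_sbetween_maxmin_af arr → Spec_sbetween_maxmin_af arr (sbetween_maxmin_af arr)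

-- ===== LEMMAS AND PROOFS =====

-- Common recursive description of "pairs of consecutive extremes of different value, with the sum between".
def specChain (mx mn : Int) : Option (Int × Int) → Int → List (Int × Int) → List (List Int)
  | _, _, [] => []
  | last, sb, (i, v) :: t =>
    if v == mx || v == mn then
      (match last with
       | some (p, vp) => if vp ≠ v then [[p, i, sb]] else []
       | none => []) ++ specChain mx mn (some (i, v)) 0 t
    else specChain mx mn last (sb + v) t

-- B's pairwise pass, written as a chain.
def pairChain (arr : List Int) : Int → List Int → List (List Int)
  | _, [] => []
  | p, q :: r =>
    (if PySem.List.pyGetD arr p 0 ≠ PySem.List.pyGetD arr q 0 then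
       [[p, q, (PySem.List.slice arr (some (p + 1)) (some q)).sum]]
     else [])
    ++ pairChain arr q r

def encBeg : Option (Int × Int) → Int
  | none => -1
  | some (p, _) => p

def InvLast (arr : List Int) : Option (Int × Int) → Prop
  | none => True
  | some (p, vp) => 0 ≤ p ∧ PySem.List.pyGetD arr p 0 = vp

lemma drop_cons_head {arr t : List Int} {x : Int} {j : Int} (hj : 0 ≤ j)
    (h : arr.drop j.toNat = x :: t) :
    PySem.List.pyGetD arr j 0 = x ∧ arr.drop (j + 1).toNat = t ∧ j.toNat < arr.length := by
  have hlt : j.toNat < arr.length := by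
    by_contra hge
    simp [List.drop_eq_nil_of_le (Nat.le_of_not_lt hge)] at h
  refine ⟨?_, ?_, hlt⟩
  · have hgd : arr[j.toNat] = x := by
      have h0 : 0 < (arr.drop j.toNat).length := by rw [h]; simp
      have := List.getElem_drop (xs := arr) (i := j.toNat) (j := 0) (h := h0)
      simp only [h, List.getElem_cons_zero, Nat.add_zero] at this
      exact this.symm
    rw [PySem.List.pyGetD_eq_getElem arr 0 hj (by omega), hgd]
  · have : (j + 1).toNat = j.toNat + 1 := by omega
    rw [this, ← List.drop_drop, h]
    simp

lemma slice_snoc (arr : List Int) (a j : Int) (ha : 0 ≤ a) (haj : a ≤ j)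
    (hj : j.toNat < arr.length) :
    PySem.List.slice arr (some a) (some (j + 1)) =
      PySem.List.slice arr (some a) (some j) ++ [arr[j.toNat]] := by
  rw [PySem.List.slice_toNat arr ha (by omega), PySem.List.slice_toNat arr ha (by omega)]
  have h1 : (j + 1).toNat - a.toNat = (j.toNat - a.toNat) + 1 := by omega
  rw [h1, List.take_add_one]
  congr 1
  have hlt : j.toNat - a.toNat < (arr.drop a.toNat).length := by
    simp [List.length_drop]; omega
  rw [List.getElem?_eq_getElem hlt]
  have hgd : (List.drop a.toNat arr)[j.toNat - a.toNat] = arr[j.toNat] := by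
    rw [List.getElem_drop]
    congr 1
    omega
  simp [hgd]

lemma slice_self_nil (arr : List Int) (a : Int) (ha : 0 ≤ a) :
    PySem.List.slice arr (some a) (some a) = [] := by
  rw [PySem.List.slice_toNat arr ha ha]
  simp

-- A's fold equals specChain.
lemma lemA (arr : List Int) (mx mn : Int) :
    ∀ (t : List Int) (j : Int) (res : List (List Int)) (last : Option (Int × Int)) (sb : Int),
      0 ≤ j → arr.drop j.toNat = t → InvLast arr last →
      (((PySem.List.enumerate t j).foldl
        (fun (st : List (List Int) × Int × Int) (iv : Int × Int) =>
          if iv.2 == mx || iv.2 == mn then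
            (if st.2.1 > -1 then
               if PySem.List.pyGetD arr st.2.1 0 - PySem.List.pyGetD arr iv.1 0 ≠ 0 then
                 st.1 ++ [[st.2.1, iv.1, st.2.2]]
               else st.1
             else st.1, iv.1, 0)
          else (st.1, st.2.1, st.2.2 + PySem.List.pyGetD arr iv.1 0))
        (res, encBeg last, sb)).1)
      = res ++ specChain mx mn last sb (PySem.List.enumerate t j) := by
  intro t
  induction t with
  | nil => intro j res last sb hj hd hinv; simp [PySem.List.enumerate_nil, specChain]
  | cons x t ih =>
    intro j res last sb hj hd hinv
    obtain ⟨hx, hd', hlt⟩ := drop_cons_head hj hd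
    rw [PySem.List.enumerate_cons]
    simp only [List.foldl_cons, specChain]
    by_cases hext : (x == mx || x == mn) = true
    · simp only [hext, if_true, hx]
      cases last with
      | none =>
        simp only [encBeg]
        have : ¬ ((-1 : Int) > -1) := by omega
        rw [if_neg this]
        have := ih (j + 1) res (some (j, x)) 0 (by omega) hd' (by exact ⟨hj, hx⟩)
        simpa [encBeg] using this
      | some pv =>
        obtain ⟨p, vp⟩ := pv
        obtain ⟨hp0, hpv⟩ := hinv
        simp only [encBeg]
        rw [if_pos (by omega : p > -1), hpv]
        by_cases hne : vp - x ≠ 0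
        · rw [if_pos hne, if_pos (by omega : vp ≠ x)]
          have ihs := ih (j + 1) (res ++ [[p, j, sb]]) (some (j, x)) 0 (by omega) hd' (by exact ⟨hj, hx⟩)
          simpa [encBeg, List.append_assoc] using ihs
        · rw [if_neg hne, if_neg (by omega : ¬ vp ≠ x)]
          have ihs := ih (j + 1) res (some (j, x)) 0 (by omega) hd' (by exact ⟨hj, hx⟩)
          simpa [encBeg] using ihs
    · simp only [hext, hx]
      exact ih (j + 1) res last (sb + x) (by omega) hd' hinv

-- B's zip/filterMap pass equals pairChain.
lemma lemZip (arr : List Int) :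
    ∀ (xs : List Int) (x : Int),
      ((x :: xs).zip xs).filterMap
        (fun pq : Int × Int =>
          if PySem.List.pyGetD arr pq.1 0 ≠ PySem.List.pyGetD arr pq.2 0 then
            some [pq.1, pq.2, (PySem.List.slice arr (some (pq.1 + 1)) (some pq.2)).sum]
          else none)
      = pairChain arr x xs := by
  intro xs
  induction xs with
  | nil => intro x; simp [pairChain]
  | cons y r ih =>
    intro x
    simp only [List.zip_cons_cons, List.filterMap_cons, pairChain]
    rw [ih y]
    split_ifs with h <;> simp

def extIdx (mx mn : Int) (l : List (Int × Int)) : List Int :=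
  (l.filter (fun iv => iv.2 == mx || iv.2 == mn)).map (·.1)

-- specChain with a pending extreme equals pairChain with slice sums.
lemma lemBsome (arr : List Int) (mx mn : Int) :
    ∀ (t : List Int) (j p vp : Int) (sb : Int),
      0 ≤ p → p < j → arr.drop j.toNat = t →
      PySem.List.pyGetD arr p 0 = vp →
      sb = (PySem.List.slice arr (some (p + 1)) (some j)).sum →
      specChain mx mn (some (p, vp)) sb (PySem.List.enumerate t j)
        = pairChain arr p (extIdx mx mn (PySem.List.enumerate t j)) := by
  intro t
  induction t with
  | nil => intro j p vp sb _ _ _ _ _; simp [PySem.List.enumerate_nil, specChain, extIdx, pairChain]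
  | cons x t ih =>
    intro j p vp sb hp0 hpj hd hpv hsb
    obtain ⟨hx, hd', hlt⟩ := drop_cons_head (by omega) hd
    rw [PySem.List.enumerate_cons]
    simp only [specChain, extIdx, List.filter_cons]
    by_cases hext : (x == mx || x == mn) = true
    · simp only [hext, if_true, List.map_cons, pairChain]
      have htail := ih (j + 1) j x 0 (by omega) (by omega) hd' hx
        (by rw [slice_self_nil arr (j+1) (by omega)]; simp)
      simp only [extIdx] at htail
      rw [htail, hpv, hx]
      have hslice : sb = (PySem.List.slice arr (some (p + 1)) (some j)).sum := hsb
      by_cases hne : vp ≠ x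
      · rw [if_pos hne, if_pos hne, hslice]
      · rw [if_neg hne, if_neg hne]
    · simp only [hext]
      have hsum : sb + x = (PySem.List.slice arr (some (p + 1)) (some (j + 1))).sum := by
        rw [slice_snoc arr (p + 1) j (by omega) (by omega) hlt]
        have : arr[j.toNat] = x := by
          rw [← PySem.List.pyGetD_eq_getElem arr (i := j) 0 (by omega) (by omega), hx]
        rw [this, List.sum_append, ← hsb]
        simp
      exact ih (j + 1) p vp (sb + x) hp0 (by omega) hd' hpv hsum

-- specChain from the initial (no pending extreme) state.
lemma lemBnone (arr : List Int) (mx mn : Int) :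
    ∀ (t : List Int) (j : Int) (sb : Int),
      0 ≤ j → arr.drop j.toNat = t →
      specChain mx mn none sb (PySem.List.enumerate t j)
        = (match extIdx mx mn (PySem.List.enumerate t j) with
           | [] => []
           | h :: r => pairChain arr h r) := by
  intro t
  induction t with
  | nil => intro j sb _ _; simp [PySem.List.enumerate_nil, specChain, extIdx]
  | cons x t ih =>
    intro j sb hj hd
    obtain ⟨hx, hd', hlt⟩ := drop_cons_head hj hd
    rw [PySem.List.enumerate_cons]
    simp only [specChain, extIdx, List.filter_cons]
    by_cases hext : (x == mx || x == mn) = true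
    · simp only [hext, if_true, List.map_cons, List.nil_append]
      exact lemBsome arr mx mn t (j + 1) j x 0 hj (by omega) hd' hx
        (by rw [slice_self_nil arr (j+1) (by omega)]; simp)
    · simp only [hext]
      exact ih (j + 1) (sb + x) (by omega) hd'

-- ===== VERDICT (by name: the statement is the Claim_ definition above) =====
theorem sbetween_maxmin_af_spec : Claim_equal_sbetween_maxmin_af := by
  intro arr _ hpre
  unfold Spec_sbetween_maxmin_af sbetween_maxmin_af sbetween_maxmin_af_alt
  cases hmx : PySem.List.max? arr (fun x => x) with
  | none => exact absurd ((PySem.List.max?_eq_none_iff arr (fun x => x)).mp hmx) hpre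
  | some mx =>
    cases hmn : PySem.List.min? arr (fun x => x) with
    | none => exact absurd ((PySem.List.min?_eq_none_iff arr (fun x => x)).mp hmn) hpre
    | some mn =>
      simp only
      have hA := lemA arr mx mn arr 0 [] none 0 le_rfl (by simp) trivial
      simp only [encBeg] at hA
      rw [hA, List.nil_append]
      rw [lemBnone arr mx mn arr 0 0 le_rfl (by simp)]
      rw [PySem.List.slice_from_one]
      cases hidx : extIdx mx mn (PySem.List.enumerate arr 0) with
      | nil =>
        simp only [extIdx] at hidx
        simp [hidx]
      | cons h r =>
        simp only [extIdx] at hidx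
        simp only [hidx, List.tail_cons]
        exact (lemZip arr r h).symm
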